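-- pv_equiv track=rewrite | github.com/MI-Lab-study/algorithm | 2024-01-11/정봉기/택배배달과수거행사.py | solution
-- ===== SOURCE A (Python) =====
-- def solution(cap, n, deliveries, pickups):
--     answer, dcap, pcap = 0, 0, 0
--
--     for i in range(n - 1, -1, -1):
--         if deliveries[i] != 0 or pickups[i] != 0:
--             tmp = 0
--             while dcap < deliveries[i] or pcap < pickups[i]:
--                 tmp += 1
--                 dcap += cap
--                 pcap += cap
--             dcap -= deliveries[i]
--             pcap -= pickups[i]
--             answer += ((i + 1) * tmp * 2)
--     return answer
-- ===== SOURCE B (Python) =====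
-- def solution(cap, n, deliveries, pickups):
--     # trip count by closed-form ceiling division instead of an incremental while loop
--     answer = dcap = pcap = 0
--     for i in range(n - 1, -1, -1):
--         d, p = deliveries[i], pickups[i]
--         if d != 0 or p != 0:
--             trips = max(0, -((dcap - d) // cap), -((pcap - p) // cap))
--             answer += (i + 1) * trips * 2
--             dcap += trips * cap - d
--             pcap += trips * cap - p
--     return answer
-- ===== Notes on version B (the rewrite author's own statement) =====
-- stated objective: alternative
-- what changed: B replaces A's inner while loop, which finds each house's trip count by adding cap one trip at a time, with a closed-form ceiling-division trip count.
-- outside the precondition, e.g. on solution(-1, 1, [-2], [-2]): A returns 0, B returns 4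
import Mathlib
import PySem

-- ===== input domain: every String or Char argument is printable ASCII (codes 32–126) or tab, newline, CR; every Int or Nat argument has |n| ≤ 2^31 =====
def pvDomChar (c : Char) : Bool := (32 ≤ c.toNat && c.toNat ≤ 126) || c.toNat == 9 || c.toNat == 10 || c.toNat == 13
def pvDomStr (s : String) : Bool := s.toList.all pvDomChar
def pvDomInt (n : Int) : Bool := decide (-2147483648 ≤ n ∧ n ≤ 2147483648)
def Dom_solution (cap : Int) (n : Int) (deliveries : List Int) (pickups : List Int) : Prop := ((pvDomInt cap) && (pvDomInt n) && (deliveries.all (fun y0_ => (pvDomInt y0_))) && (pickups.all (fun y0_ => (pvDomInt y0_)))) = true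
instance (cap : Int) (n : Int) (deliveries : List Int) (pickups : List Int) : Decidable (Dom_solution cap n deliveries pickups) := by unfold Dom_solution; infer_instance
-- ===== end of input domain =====

-- B computes each house's trip count by a closed-form ceiling division instead of A's
-- one-trip-at-a-time while loop.

-- ===== PORT A =====
-- A's inner `while dcap < d or pcap < p: tmp += 1; dcap += cap; pcap += cap`.
-- Returns (tmp, dcap, pcap). The `¬ 0 < cap` branch makes the recursion total:
-- there Python loops forever (Pre_ excludes cap ≤ 0 whenever the loop body is reached).
def pyWhileA (cap d p dcap pcap : Int) : Int × Int × Int :=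
  if dcap < d ∨ pcap < p then
    if h : 0 < cap then
      let r := pyWhileA cap d p (dcap + cap) (pcap + cap)
      (r.1 + 1, r.2.1, r.2.2)
    else (0, dcap, pcap)
  else (0, dcap, pcap)
termination_by ((d - dcap) ⊔ (p - pcap)).toNat
decreasing_by omega

-- one iteration of A's `for i in range(n-1,-1,-1)` body; state = (answer, dcap, pcap)
def stepA (cap : Int) (deliveries pickups : List Int) (st : Int × Int × Int) (i : Int) : Int × Int × Int :=
  -- d := deliveries[i], p := pickups[i]; i is in range under Pre_ (IndexError otherwise)
  if PySem.List.pyGetD deliveries i 0 ≠ 0 ∨ PySem.List.pyGetD pickups i 0 ≠ 0 then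
    let r := pyWhileA cap (PySem.List.pyGetD deliveries i 0) (PySem.List.pyGetD pickups i 0) st.2.1 st.2.2
    (st.1 + (i + 1) * r.1 * 2, r.2.1 - PySem.List.pyGetD deliveries i 0, r.2.2 - PySem.List.pyGetD pickups i 0)
  else st

def solution (cap : Int) (n : Int) (deliveries : List Int) (pickups : List Int) : Int :=
  ((PySem.List.pyRange (n - 1) (-1) (-1)).foldl (stepA cap deliveries pickups) (0, 0, 0)).1

-- ===== PORT B =====
-- one iteration of B's loop body: trips = max(0, -((dcap-d)//cap), -((pcap-p)//cap))
def stepB (cap : Int) (deliveries pickups : List Int) (st : Int × Int × Int) (i : Int) : Int × Int × Int :=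
  if PySem.List.pyGetD deliveries i 0 ≠ 0 ∨ PySem.List.pyGetD pickups i 0 ≠ 0 then
    let trips := max (max 0 (-(PySem.Int.floordiv (st.2.1 - PySem.List.pyGetD deliveries i 0) cap))) (-(PySem.Int.floordiv (st.2.2 - PySem.List.pyGetD pickups i 0) cap))
    (st.1 + (i + 1) * trips * 2, st.2.1 + trips * cap - PySem.List.pyGetD deliveries i 0, st.2.2 + trips * cap - PySem.List.pyGetD pickups i 0)
  else st

def solution_alt (cap : Int) (n : Int) (deliveries : List Int) (pickups : List Int) : Int :=
  ((PySem.List.pyRange (n - 1) (-1) (-1)).foldl (stepB cap deliveries pickups) (0, 0, 0)).1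

-- ===== PRECONDITION & SPEC =====
-- Pre_ restricts to the natural domain of the problem: capacity cap ≥ 1 (on cap ≤ 0 A loops
-- forever on any positive demand, and B divides by cap; n ≤ 0 is kept, the loop is empty) and
-- n within both list lengths (IndexError otherwise).
def Pre_solution (cap : Int) (n : Int) (deliveries : List Int) (pickups : List Int) : Prop :=
  n ≤ (deliveries.length : Int) ∧ n ≤ (pickups.length : Int) ∧ (1 ≤ cap ∨ n ≤ 0)
instance (cap : Int) (n : Int) (deliveries : List Int) (pickups : List Int) : Decidable (Pre_solution cap n deliveries pickups) := by unfold Pre_solution; infer_instance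

def pvWitness_solution : Int × Int × List Int × List Int := (4, 2, [1, 0], [0, 3])

def Spec_solution (cap : Int) (n : Int) (deliveries : List Int) (pickups : List Int) (out : Int) : Prop := out = solution_alt cap n deliveries pickups
instance (cap : Int) (n : Int) (deliveries : List Int) (pickups : List Int) (out : Int) : Decidable (Spec_solution cap n deliveries pickups out) := by unfold Spec_solution; infer_instance

-- ===== CLAIM (what is proved, stated in full; the proofs are below) =====
def Claim_equal_solution : Prop := ∀ (cap : Int) (n : Int) (deliveries : List Int) (pickups : List Int), Dom_solution cap n deliveries pickups → Pre_solution cap n deliveries pickups → Spec_solution cap n deliveries pickups (solution cap n deliveries pickups)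

-- ===== LEMMAS AND PROOFS =====

-- A's while loop computes exactly B's ceiling-division trip count.
theorem pyWhileA_eq (cap d p dcap pcap : Int) (hc : 0 < cap) :
    pyWhileA cap d p dcap pcap =
      (max (max 0 (-(PySem.Int.floordiv (dcap - d) cap))) (-(PySem.Int.floordiv (pcap - p) cap)),
       dcap + (max (max 0 (-(PySem.Int.floordiv (dcap - d) cap))) (-(PySem.Int.floordiv (pcap - p) cap))) * cap,
       pcap + (max (max 0 (-(PySem.Int.floordiv (dcap - d) cap))) (-(PySem.Int.floordiv (pcap - p) cap))) * cap) := by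
  fun_induction pyWhileA cap d p dcap pcap with
  | case1 dcap pcap hcond hpos r ih =>
    simp only [PySem.Int.floordiv_eq_ediv_of_pos hc] at ih ⊢
    have hqd : (dcap + cap - d) / cap = (dcap - d) / cap + 1 := by
      have := Int.add_mul_ediv_right (dcap - d) 1 (by omega : cap ≠ 0)
      simpa [one_mul] using (by rw [show dcap + cap - d = (dcap - d) + 1 * cap by ring, this])
    have hqp : (pcap + cap - p) / cap = (pcap - p) / cap + 1 := by
      have := Int.add_mul_ediv_right (pcap - p) 1 (by omega : cap ≠ 0)
      simpa [one_mul] using (by rw [show pcap + cap - p = (pcap - p) + 1 * cap by ring, this])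
    have hge1 : 1 ≤ -((dcap - d) / cap) ∨ 1 ≤ -((pcap - p) / cap) := by
      rcases hcond with h | h
      · exact Or.inl (by have := Int.ediv_neg_of_neg_of_pos (by omega : dcap - d < 0) hc; omega)
      · exact Or.inr (by have := Int.ediv_neg_of_neg_of_pos (by omega : pcap - p < 0) hc; omega)
    have hr : r = _ := ih
    rw [hr]
    have ht : max (max 0 (-((dcap - d) / cap))) (-((pcap - p) / cap)) =
        max (max 0 (-((dcap + cap - d) / cap))) (-((pcap + cap - p) / cap)) + 1 := by
      rw [hqd, hqp]; omega
    refine Prod.ext ?_ (Prod.ext ?_ ?_) <;> simp only [ht] <;> ring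
  | case2 dcap pcap hcond hpos => omega
  | case3 dcap pcap hcond =>
    simp only [PySem.Int.floordiv_eq_ediv_of_pos hc]
    have h1 : 0 ≤ (dcap - d) / cap := Int.ediv_nonneg (by omega) (by omega)
    have h2 : 0 ≤ (pcap - p) / cap := Int.ediv_nonneg (by omega) (by omega)
    have ht : max (max 0 (-((dcap - d) / cap))) (-((pcap - p) / cap)) = 0 := by omega
    rw [ht]
    simp

theorem stepA_eq_stepB (cap : Int) (deliveries pickups : List Int) (hc : 0 < cap)
    (st : Int × Int × Int) (i : Int) :
    stepA cap deliveries pickups st i = stepB cap deliveries pickups st i := by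
  unfold stepA stepB
  split
  · rw [pyWhileA_eq _ _ _ _ _ hc]
  · rfl

theorem foldl_stepA_eq (cap : Int) (deliveries pickups : List Int) (hc : 0 < cap)
    (l : List Int) (st : Int × Int × Int) :
    l.foldl (stepA cap deliveries pickups) st = l.foldl (stepB cap deliveries pickups) st := by
  induction l generalizing st with
  | nil => rfl
  | cons x xs ih => simp only [List.foldl_cons, stepA_eq_stepB cap deliveries pickups hc, ih]

theorem pyRange_empty_of_nonpos (n : Int) (hn : n ≤ 0) :
    PySem.List.pyRange (n - 1) (-1) (-1) = [] := by
  simp [PySem.List.pyRange, show ¬((-1 : Int) < n - 1) from by omega]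

-- ===== VERDICT (by name: the statement is the Claim_ definition above) =====
theorem solution_spec : Claim_equal_solution := by
  intro cap n deliveries pickups _ hpre
  rcases hpre with ⟨_, _, hcap | hn⟩
  · unfold Spec_solution solution solution_alt
    rw [foldl_stepA_eq cap deliveries pickups (by omega)]
  · unfold Spec_solution solution solution_alt
    rw [pyRange_empty_of_nonpos n hn]
    rfl
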